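-- pv_equiv track=rewrite | github.com/TabareMajem/momentAIc | momentaic-backend/app/agents/sdr_agent.py | _parse_followup_sequence
-- ===== SOURCE A (Python) =====
-- from typing import Dict, Any, List, Optional
--
-- def _parse_followup_sequence(response: str) -> List[Dict[str, str]]:
--     """Parse follow-up sequence from LLM response"""
--     followups = []
--     current_followup = None
--     in_body = False
--     body_lines = []
--
--     for line in response.split("\n"):
--         if line.startswith("---FOLLOWUP"):
--             if current_followup:
--                 current_followup["body"] = "\n".join(body_lines).strip()
--                 followups.append(current_followup)
--             current_followup = {"subject": "", "body": ""}
--             body_lines = []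
--             in_body = False
--         elif line.startswith("SUBJECT:") and current_followup:
--             current_followup["subject"] = line.replace("SUBJECT:", "").strip()
--         elif line.strip() == "BODY:":
--             in_body = True
--         elif line.startswith("---END"):
--             if current_followup:
--                 current_followup["body"] = "\n".join(body_lines).strip()
--                 followups.append(current_followup)
--             current_followup = None
--             body_lines = []
--             in_body = False
--         elif in_body:
--             body_lines.append(line)
--
--     if current_followup:
--         current_followup["body"] = "\n".join(body_lines).strip()
--         followups.append(current_followup)
--
--     return followups
-- ===== SOURCE B (Python) =====
-- from typing import Dict, List
--
--
-- def _split_blocks(lines: List[str]) -> List[List[str]]: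
--     """Cut the line stream into record blocks: a block opens at each
--     '---FOLLOWUP' line, closes at the next '---FOLLOWUP'/'---END' line
--     (or at end of input); lines outside any open block are dropped."""
--     blocks = []
--     cur = None
--     for line in lines:
--         if line.startswith("---FOLLOWUP"):
--             if cur is not None:
--                 blocks.append(cur)
--             cur = []
--         elif line.startswith("---END"):
--             if cur is not None:
--                 blocks.append(cur)
--             cur = None
--         elif cur is not None:
--             cur.append(line)
--     if cur is not None:
--         blocks.append(cur)
--     return blocks
--
--
-- def _parse_block(lines: List[str]) -> Dict[str, str]:
--     """Pure parse of one record block."""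
--     subjects = [l for l in lines if l.startswith("SUBJECT:")]
--     subject = subjects[-1].replace("SUBJECT:", "").strip() if subjects else ""
--     body = ""
--     for i, l in enumerate(lines):
--         if l.strip() == "BODY:":
--             body = "\n".join(
--                 x for x in lines[i + 1:]
--                 if not x.startswith("SUBJECT:") and x.strip() != "BODY:"
--             ).strip()
--             break
--     return {"subject": subject, "body": body}
--
--
-- def _parse_followup_sequence(response: str) -> List[Dict[str, str]]:
--     return [_parse_block(b) for b in _split_blocks(response.split("\n"))]
-- ===== Notes on version B (the rewrite author's own statement) =====
-- stated objective: alternative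
-- what changed: A's single five-branch loop carrying followups/current dict/in_body flag/body_lines is replaced by two pure stages: first cut the line stream into record blocks delimited by ---FOLLOWUP/---END markers, then map an independent per-block parser (last SUBJECT: line; lines after the first BODY: marker, excluding SUBJECT:/BODY: lines) over the blocks.
import Mathlib
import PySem

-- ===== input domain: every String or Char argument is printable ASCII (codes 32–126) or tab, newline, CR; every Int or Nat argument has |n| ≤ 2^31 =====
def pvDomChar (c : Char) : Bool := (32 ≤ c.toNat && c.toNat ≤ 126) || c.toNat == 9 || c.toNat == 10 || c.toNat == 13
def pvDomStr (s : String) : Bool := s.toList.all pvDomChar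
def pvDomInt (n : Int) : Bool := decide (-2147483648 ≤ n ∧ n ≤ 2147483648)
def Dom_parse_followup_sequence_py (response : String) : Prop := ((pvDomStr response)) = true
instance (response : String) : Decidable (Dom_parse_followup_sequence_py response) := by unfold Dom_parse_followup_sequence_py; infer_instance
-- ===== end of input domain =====

-- B re-decomposes A's one five-branch stateful loop into two pure stages (cut the
-- lines into record blocks, then parse each block independently); same results, no speed claim.

-- ===== PORT A =====
-- Loop state: (followups, current_followup, in_body, body_lines).
-- current_followup is None or a dict that always has the two keys "subject","body",
-- so Python's truthiness test 'and current_followup' is exactly Option.isSome here.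
def pyA_step (st : List (PySem.Dict String String) × Option (PySem.Dict String String) × Bool × List String)
    (line : String) : List (PySem.Dict String String) × Option (PySem.Dict String String) × Bool × List String :=
  match st with
  | (fups, cur, inBody, bodyLines) =>
    if PySem.Str.startswith line "---FOLLOWUP" then
      let fups' := match cur with
        | some d => fups ++ [PySem.Dict.insert d "body" (PySem.Str.strip (PySem.Str.join "\n" bodyLines))]
        | none => fups
      (fups', some ⟨[("subject", ""), ("body", "")]⟩, false, [])
    else if PySem.Str.startswith line "SUBJECT:" && cur.isSome then
      (fups, cur.map (fun d => PySem.Dict.insert d "subject" (PySem.Str.strip (PySem.Str.replace line "SUBJECT:" ""))), inBody, bodyLines)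
    else if PySem.Str.strip line == "BODY:" then
      (fups, cur, true, bodyLines)
    else if PySem.Str.startswith line "---END" then
      let fups' := match cur with
        | some d => fups ++ [PySem.Dict.insert d "body" (PySem.Str.strip (PySem.Str.join "\n" bodyLines))]
        | none => fups
      (fups', none, false, [])
    else if inBody then
      (fups, cur, inBody, bodyLines ++ [line])
    else
      (fups, cur, inBody, bodyLines)

def parse_followup_sequence_py (response : String) : List (List (String × String)) :=
  let lines := (PySem.Str.split? response "\n").getD []
  let st := lines.foldl pyA_step ([], none, false, [])
  let fups := match st.2.1 with
    | some d => st.1 ++ [PySem.Dict.insert d "body" (PySem.Str.strip (PySem.Str.join "\n" st.2.2.2))]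
    | none => st.1
  fups.map PySem.Dict.items

-- ===== PORT B =====
def pyB_blockStep (st : List (List String) × Option (List String)) (line : String) :
    List (List String) × Option (List String) :=
  if PySem.Str.startswith line "---FOLLOWUP" then
    ((match st.2 with | some c => st.1 ++ [c] | none => st.1), some [])
  else if PySem.Str.startswith line "---END" then
    ((match st.2 with | some c => st.1 ++ [c] | none => st.1), none)
  else
    match st.2 with
    | some c => (st.1, some (c ++ [line]))
    | none => st

def pyB_splitBlocks (lines : List String) : List (List String) :=
  let st := lines.foldl pyB_blockStep ([], none)
  match st.2 with | some c => st.1 ++ [c] | none => st.1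

def pyB_bodyKeep (x : String) : Bool :=
  !PySem.Str.startswith x "SUBJECT:" && !(PySem.Str.strip x == "BODY:")

def pyB_findBody : List String → String
  | [] => ""
  | l :: rest =>
    if PySem.Str.strip l == "BODY:" then
      PySem.Str.strip (PySem.Str.join "\n" (rest.filter pyB_bodyKeep))
    else pyB_findBody rest

def pyB_parseBlock (lines : List String) : List (String × String) :=
  let subjects := lines.filter (fun l => PySem.Str.startswith l "SUBJECT:")
  let subject := match subjects.getLast? with
    | some l => PySem.Str.strip (PySem.Str.replace l "SUBJECT:" "")
    | none => ""
  [("subject", subject), ("body", pyB_findBody lines)]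

def parse_followup_sequence_py_alt (response : String) : List (List (String × String)) :=
  (pyB_splitBlocks ((PySem.Str.split? response "\n").getD [])).map pyB_parseBlock

-- ===== PRECONDITION & SPEC =====
def Spec_parse_followup_sequence_py (response : String) (out : List (List (String × String))) : Prop := out = parse_followup_sequence_py_alt response
instance (response : String) (out : List (List (String × String))) : Decidable (Spec_parse_followup_sequence_py response out) := by unfold Spec_parse_followup_sequence_py; infer_instance

-- ===== CLAIM (what is proved, stated in full; the proofs are below) =====
def Claim_equal_parse_followup_sequence_py : Prop := ∀ (response : String), Dom_parse_followup_sequence_py response → Spec_parse_followup_sequence_py response (parse_followup_sequence_py response)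

-- ===== LEMMAS AND PROOFS =====

-- proof-side abbreviations for the components of pyB_parseBlock
def subjOfAux (ls : List String) : String :=
  match (ls.filter (fun l => PySem.Str.startswith l "SUBJECT:")).getLast? with
  | some l => PySem.Str.strip (PySem.Str.replace l "SUBJECT:" "")
  | none => ""

def seenB (ls : List String) : Bool := ls.any (fun l => PySem.Str.strip l == "BODY:")

def bodyAcc : List String → List String
  | [] => []
  | l :: rest => if PySem.Str.strip l == "BODY:" then rest.filter pyB_bodyKeep else bodyAcc rest

lemma parseBlock_eq (ls : List String) :
    pyB_parseBlock ls = [("subject", subjOfAux ls), ("body", pyB_findBody ls)] := by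
  simp [pyB_parseBlock, subjOfAux]

lemma findBody_eq (ls : List String) :
    pyB_findBody ls = PySem.Str.strip (PySem.Str.join "\n" (bodyAcc ls)) := by
  induction ls with
  | nil => decide
  | cons l rest ih =>
    simp only [pyB_findBody, bodyAcc]
    split_ifs with h <;> simp [ih]

lemma bodyAcc_of_not_seen (ls : List String) (h : seenB ls = false) : bodyAcc ls = [] := by
  induction ls with
  | nil => rfl
  | cons l rest ih =>
    simp only [seenB, List.any_cons, Bool.or_eq_false_iff] at h
    simp only [bodyAcc, h.1, Bool.false_eq_true, if_false]
    exact ih h.2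

lemma bodyAcc_append (ls : List String) (l : String) :
    bodyAcc (ls ++ [l]) =
      if seenB ls then bodyAcc ls ++ (if pyB_bodyKeep l then [l] else []) else [] := by
  induction ls with
  | nil =>
    have hs : seenB ([] : List String) = false := rfl
    rw [hs]
    cases hc : (PySem.Str.strip l == "BODY:") <;> simp [bodyAcc, hc]
  | cons x rest ih =>
    by_cases hx : (PySem.Str.strip x == "BODY:") = true
    · have hs : seenB (x :: rest) = true := by simp [seenB, hx]
      rw [hs]
      simp only [List.cons_append, bodyAcc, hx, if_true, List.filter_append]
      cases hk : pyB_bodyKeep l <;> simp [List.filter_cons, hk]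
    · have hx' : (PySem.Str.strip x == "BODY:") = false := by simpa using hx
      have hs : seenB (x :: rest) = seenB rest := by simp [seenB, hx']
      rw [hs]
      simp only [List.cons_append, bodyAcc, hx', Bool.false_eq_true, if_false, ih]

lemma bodyAcc_append_of_not_keep (ls : List String) (l : String) (h : pyB_bodyKeep l = false) :
    bodyAcc (ls ++ [l]) = bodyAcc ls := by
  rw [bodyAcc_append]
  cases hs : seenB ls
  · simp [bodyAcc_of_not_seen ls hs]
  · simp [h]

lemma seenB_append (ls : List String) (l : String) :
    seenB (ls ++ [l]) = (seenB ls || (PySem.Str.strip l == "BODY:")) := by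
  simp [seenB]

lemma subjOfAux_append_pos (ls : List String) (l : String)
    (h : PySem.Str.startswith l "SUBJECT:" = true) :
    subjOfAux (ls ++ [l]) = PySem.Str.strip (PySem.Str.replace l "SUBJECT:" "") := by
  unfold subjOfAux
  rw [List.filter_append,
    show List.filter (fun l => PySem.Str.startswith l "SUBJECT:") [l] = [l] by
      simp only [List.filter_cons, List.filter_nil, h, if_true],
    List.getLast?_concat]

lemma subjOfAux_append_neg (ls : List String) (l : String)
    (h : PySem.Str.startswith l "SUBJECT:" = false) :
    subjOfAux (ls ++ [l]) = subjOfAux ls := by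
  unfold subjOfAux
  rw [List.filter_append,
    show List.filter (fun l => PySem.Str.startswith l "SUBJECT:") [l] = [] by
      simp only [List.filter_cons, List.filter_nil, h, Bool.false_eq_true, if_false],
    List.append_nil]

-- a non-whitespace head survives strip
lemma strip_cons_of_not_space (c : Char) (t : List Char) (h : PySem.Chars.isspace c = false) :
    PySem.Chars.strip (c :: t) = c :: PySem.Chars.rstrip t := by
  simp only [PySem.Chars.strip, PySem.Chars.lstrip, PySem.Chars.rstrip,
    List.dropWhile_cons, h, Bool.false_eq_true, if_false, List.reverse_cons,
    List.dropWhile_append]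
  split_ifs with he
  · simp only [List.isEmpty_iff] at he
    simp [he, List.dropWhile_cons, h]
  · simp [List.reverse_append]

-- branch-disjointness facts
lemma subj_not_end (l : String) (h : PySem.Str.startswith l "SUBJECT:" = true) :
    PySem.Str.startswith l "---END" = false := by
  simp only [PySem.Str.startswith] at h ⊢
  rcases hl : l.toList with _ | ⟨c, t⟩ <;> rw [hl] at h
  · exact absurd h (by decide)
  · have hc : c = 'S' := by
      have h' : ("SUBJECT:".toList).isPrefixOf (c :: t) = true := h
      simp only [show "SUBJECT:".toList = ['S','U','B','J','E','C','T',':'] from rfl,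
        List.isPrefixOf, Bool.and_eq_true, beq_iff_eq] at h'
      exact h'.1.symm
    simp [PySem.Chars.startswith, show "---END".toList = ['-','-','-','E','N','D'] from rfl,
      List.isPrefixOf, hc]

lemma subj_not_body (l : String) (h : PySem.Str.startswith l "SUBJECT:" = true) :
    (PySem.Str.strip l == "BODY:") = false := by
  rcases hl : l.toList with _ | ⟨c, t⟩
  · simp only [PySem.Str.startswith, hl] at h
    exact absurd h (by decide)
  · have hc : c = 'S' := by
      simp only [PySem.Str.startswith, hl, PySem.Chars.startswith,
        show "SUBJECT:".toList = ['S','U','B','J','E','C','T',':'] from rfl,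
        List.isPrefixOf, Bool.and_eq_true, beq_iff_eq] at h
      exact h.1.symm
    apply beq_eq_false_iff_ne.mpr
    intro he
    have hT : (PySem.Str.strip l).toList = "BODY:".toList := by rw [he]
    rw [PySem.Str.toList_strip, hl, hc,
      strip_cons_of_not_space 'S' t (by decide)] at hT
    simp [show "BODY:".toList = ['B','O','D','Y',':'] from rfl] at hT

lemma body_not_end (l : String) (h : (PySem.Str.strip l == "BODY:") = true) :
    PySem.Str.startswith l "---END" = false := by
  rcases hl : l.toList with _ | ⟨c, t⟩
  · simp [PySem.Str.startswith, hl, PySem.Chars.startswith,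
      show "---END".toList = ['-','-','-','E','N','D'] from rfl, List.isPrefixOf]
  · cases hE : PySem.Str.startswith l "---END"
    · rfl
    · exfalso
      have hc : c = '-' := by
        simp only [PySem.Str.startswith, hl, PySem.Chars.startswith,
          show "---END".toList = ['-','-','-','E','N','D'] from rfl,
          List.isPrefixOf, Bool.and_eq_true, beq_iff_eq] at hE
        exact hE.1.symm
      have he : PySem.Str.strip l = "BODY:" := by simpa using h
      have hT : (PySem.Str.strip l).toList = "BODY:".toList := by rw [he]
      rw [PySem.Str.toList_strip, hl, hc,
        strip_cons_of_not_space '-' t (by decide)] at hT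
      simp [show "BODY:".toList = ['B','O','D','Y',':'] from rfl] at hT

-- Dict.insert on the two-key record
lemma ins_subject (s v : String) :
    PySem.Dict.insert (⟨[("subject", s), ("body", "")]⟩ : PySem.Dict String String) "subject" v
      = ⟨[("subject", v), ("body", "")]⟩ := by
  simp [PySem.Dict.insert, PySem.Dict.contains]

lemma ins_body (s b v : String) :
    PySem.Dict.insert (⟨[("subject", s), ("body", b)]⟩ : PySem.Dict String String) "body" v
      = ⟨[("subject", s), ("body", v)]⟩ := by
  simp [PySem.Dict.insert, PySem.Dict.contains]

-- the invariant tying A's loop state to B's block-builder state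
def RelState (stA : List (PySem.Dict String String) × Option (PySem.Dict String String) × Bool × List String)
    (stB : List (List String) × Option (List String)) : Prop :=
  stA.1.map PySem.Dict.items = stB.1.map pyB_parseBlock ∧
  ((stA.2.1 = none ∧ stB.2 = none) ∨
   ∃ ls, stA.2.1 = some ⟨[("subject", subjOfAux ls), ("body", "")]⟩ ∧ stB.2 = some ls ∧
         stA.2.2.1 = seenB ls ∧ stA.2.2.2 = bodyAcc ls)

lemma close_eq (ls : List String) :
    (PySem.Dict.insert (⟨[("subject", subjOfAux ls), ("body", "")]⟩ : PySem.Dict String String)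
        "body" (PySem.Str.strip (PySem.Str.join "\n" (bodyAcc ls)))).items
      = pyB_parseBlock ls := by
  rw [ins_body, parseBlock_eq, findBody_eq]

lemma step_rel (stA : List (PySem.Dict String String) × Option (PySem.Dict String String) × Bool × List String)
    (stB : List (List String) × Option (List String)) (line : String)
    (h : RelState stA stB) : RelState (pyA_step stA line) (pyB_blockStep stB line) := by
  obtain ⟨fups, cur, inBody, bodyLines⟩ := stA
  obtain ⟨blocks, bcur⟩ := stB
  obtain ⟨h1, hc⟩ := h
  dsimp only at h1 hc
  by_cases hF : PySem.Str.startswith line "---FOLLOWUP" = true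
  · -- a new record opens, closing any current one
    simp only [pyA_step, pyB_blockStep, hF, if_true]
    rcases hc with ⟨hA, hB⟩ | ⟨ls, hA, hB, hs, hb⟩ <;> rw [hA, hB]
    · exact ⟨h1, Or.inr ⟨[], rfl, rfl, rfl, rfl⟩⟩
    · refine ⟨?_, Or.inr ⟨[], rfl, rfl, rfl, rfl⟩⟩
      rw [hb]
      simp only [List.map_append, List.map_cons, List.map_nil, close_eq, h1]
  · by_cases hS : (PySem.Str.startswith line "SUBJECT:" && (Option.isSome cur)) = true
    · -- SUBJECT line inside an open record
      rw [Bool.and_eq_true] at hS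
      rcases hc with ⟨hA, hB⟩ | ⟨ls, hA, hB, hs, hb⟩
      · rw [hA] at hS; exact absurd hS.2 (by simp)
      · have hSubj := hS.1
        have hNB := subj_not_body line hSubj
        have hNE := subj_not_end line hSubj
        rw [hA, hB]
        simp only [pyA_step, pyB_blockStep, hF, Bool.false_eq_true, if_false,
          hSubj, Option.isSome_some, Bool.and_true, Bool.and_self, if_true, Option.map_some,
          hNE, hNB]
        refine ⟨h1, Or.inr ⟨ls ++ [line], ?_, rfl, ?_, ?_⟩⟩
        · rw [ins_subject, subjOfAux_append_pos ls line hSubj]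
        · rw [hs, seenB_append, hNB, Bool.or_false]
        · rw [hb, bodyAcc_append_of_not_keep ls line (by simp only [pyB_bodyKeep, hSubj, Bool.not_true, Bool.false_and])]
    · have hS' : (PySem.Str.startswith line "SUBJECT:" && (Option.isSome cur)) = false := by
        simpa using hS
      by_cases hBd : (PySem.Str.strip line == "BODY:") = true
      · -- a BODY: marker line
        have hNE := body_not_end line hBd
        rcases hc with ⟨hA, hB⟩ | ⟨ls, hA, hB, hs, hb⟩ <;> rw [hA, hB]
        · simp only [pyA_step, pyB_blockStep, hF, Bool.false_eq_true, if_false,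
            Option.isSome_none, Bool.and_false, hBd, if_true, hNE]
          exact ⟨h1, Or.inl ⟨rfl, rfl⟩⟩
        · rw [hA] at hS'
          have hSubj : PySem.Str.startswith line "SUBJECT:" = false := by
            rw [Option.isSome_some, Bool.and_true] at hS'; exact hS'
          simp only [pyA_step, pyB_blockStep, hF, Bool.false_eq_true, if_false,
            hSubj, Bool.false_and, hBd, if_true, hNE]
          refine ⟨h1, Or.inr ⟨ls ++ [line], ?_, rfl, ?_, ?_⟩⟩
          · rw [subjOfAux_append_neg ls line hSubj]
          · rw [seenB_append, hBd, Bool.or_true]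
          · rw [hb, bodyAcc_append_of_not_keep ls line (by simp only [pyB_bodyKeep, hBd, Bool.not_true, Bool.and_false])]
      · have hBd' : (PySem.Str.strip line == "BODY:") = false := by simpa using hBd
        by_cases hE : PySem.Str.startswith line "---END" = true
        · -- the record (if any) closes
          rcases hc with ⟨hA, hB⟩ | ⟨ls, hA, hB, hs, hb⟩ <;> rw [hA, hB]
          · simp only [pyA_step, pyB_blockStep, hF, Bool.false_eq_true, if_false,
              Option.isSome_none, Bool.and_false, hBd', hE, if_true]
            exact ⟨h1, Or.inl ⟨rfl, rfl⟩⟩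
          · rw [hA] at hS'
            have hSubj : PySem.Str.startswith line "SUBJECT:" = false := by
              rw [Option.isSome_some, Bool.and_true] at hS'; exact hS'
            simp only [pyA_step, pyB_blockStep, hF, Bool.false_eq_true, if_false,
              hSubj, Bool.false_and, hBd', hE, if_true]
            refine ⟨?_, Or.inl ⟨rfl, rfl⟩⟩
            rw [hb]
            simp only [List.map_append, List.map_cons, List.map_nil, close_eq, h1]
        · have hE' : PySem.Str.startswith line "---END" = false := by simpa using hE
          -- an ordinary line
          rcases hc with ⟨hA, hB⟩ | ⟨ls, hA, hB, hs, hb⟩ <;> rw [hA, hB]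
          · simp only [pyA_step, pyB_blockStep, hF, Bool.false_eq_true, if_false,
              Option.isSome_none, Bool.and_false, hBd', hE']
            cases inBody <;> exact ⟨h1, Or.inl ⟨rfl, rfl⟩⟩
          · rw [hA] at hS'
            have hSubj : PySem.Str.startswith line "SUBJECT:" = false := by
              rw [Option.isSome_some, Bool.and_true] at hS'; exact hS'
            have hKeep : pyB_bodyKeep line = true := by
              simp only [pyB_bodyKeep, hSubj, hBd', Bool.not_false, Bool.and_self]
            simp only [pyA_step, pyB_blockStep, hF, Bool.false_eq_true, if_false,
              hSubj, Bool.false_and, hBd', hE']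
            refine ⟨?_, ?_⟩
            · cases inBody <;> simpa using h1
            · refine Or.inr ⟨ls ++ [line], ?_, ?_, ?_, ?_⟩
              · rw [subjOfAux_append_neg ls line hSubj]
                cases inBody <;> rfl
              · cases inBody <;> rfl
              · cases hsl : seenB ls <;> rw [hsl] at hs <;> subst hs <;>
                  simp [seenB_append, hsl, hBd']
              · rw [bodyAcc_append]
                cases hsl : seenB ls <;> rw [hsl] at hs <;> subst hs
                · simp [hb, bodyAcc_of_not_seen ls hsl]
                · simp [hb, hKeep]

lemma fold_rel (lines : List String)
    (stA : List (PySem.Dict String String) × Option (PySem.Dict String String) × Bool × List String)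
    (stB : List (List String) × Option (List String)) (h : RelState stA stB) :
    RelState (lines.foldl pyA_step stA) (lines.foldl pyB_blockStep stB) := by
  induction lines generalizing stA stB with
  | nil => exact h
  | cons l rest ih => exact ih _ _ (step_rel _ _ _ h)

lemma finish_rel (stA : List (PySem.Dict String String) × Option (PySem.Dict String String) × Bool × List String)
    (stB : List (List String) × Option (List String)) (h : RelState stA stB) :
    (match stA.2.1 with
      | some d => stA.1 ++ [PySem.Dict.insert d "body" (PySem.Str.strip (PySem.Str.join "\n" stA.2.2.2))]
      | none => stA.1).map PySem.Dict.items
      = (match stB.2 with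
          | some c => stB.1 ++ [c]
          | none => stB.1).map pyB_parseBlock := by
  obtain ⟨h1, hc⟩ := h
  rcases hc with ⟨hA, hB⟩ | ⟨ls, hA, hB, hs, hb⟩ <;> rw [hA, hB]
  · exact h1
  · rw [hb]
    simp only [List.map_append, List.map_cons, List.map_nil, close_eq, h1]

-- ===== VERDICT (by name: the statement is the Claim_ definition above) =====
theorem parse_followup_sequence_py_spec : Claim_equal_parse_followup_sequence_py := by
  intro response _
  unfold Spec_parse_followup_sequence_py parse_followup_sequence_py parse_followup_sequence_py_alt pyB_splitBlocks
  exact finish_rel _ _ (fold_rel ((PySem.Str.split? response "\n").getD []) ([], none, false, [])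
    ([], none) ⟨rfl, Or.inl ⟨rfl, rfl⟩⟩)
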